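-- pv_equiv track=rewrite | github.com/srinivaspavan9/cis6930sp24-assignment3 | assignment2.py | calculate_incident_ranks
-- ===== SOURCE A (Python) =====
-- from collections import Counter
--
-- def calculate_incident_ranks(incidents):
--     # Extract all natures
--     natures = [incident[3] for incident in incidents]  # Assuming nature is at index 3
--     # Count frequencies of each nature
--     nature_freq = Counter(natures)
--     # Sort natures by frequency (and alphabetically within the same frequency)
--     sorted_natures = sorted(nature_freq.items(), key=lambda x: (-x[1], x[0]))
--
--     ranks = {}
--     last_freq = None
--     last_rank = 0
--     skip = 1
--     for nature, freq in sorted_natures: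
--         if freq == last_freq:
--             # Same rank for ties
--             ranks[nature] = last_rank
--             skip += 1
--         else:
--             last_rank += skip
--             ranks[nature] = last_rank
--             skip = 1
--         last_freq = freq
--
--     return ranks
-- ===== SOURCE B (Python) =====
-- from collections import Counter
--
-- def calculate_incident_ranks(incidents):
--     # Competition rank of a nature = 1 + number of natures with strictly greater frequency.
--     freq = Counter(incident[3] for incident in incidents)
--     ordered = sorted(freq.items(), key=lambda x: (-x[1], x[0]))
--     values = list(freq.values())
--     return {name: 1 + sum(1 for g in values if g > f) for name, f in ordered}
-- ===== Notes on version B (the rewrite author's own statement) =====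
-- stated objective: alternative
-- what changed: Replaces the stateful walk over the sorted items (last_freq/last_rank/skip accumulators) by the closed-form competition rank: each nature's rank is 1 + the number of natures with strictly greater frequency, computed directly per nature.
import Mathlib
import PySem

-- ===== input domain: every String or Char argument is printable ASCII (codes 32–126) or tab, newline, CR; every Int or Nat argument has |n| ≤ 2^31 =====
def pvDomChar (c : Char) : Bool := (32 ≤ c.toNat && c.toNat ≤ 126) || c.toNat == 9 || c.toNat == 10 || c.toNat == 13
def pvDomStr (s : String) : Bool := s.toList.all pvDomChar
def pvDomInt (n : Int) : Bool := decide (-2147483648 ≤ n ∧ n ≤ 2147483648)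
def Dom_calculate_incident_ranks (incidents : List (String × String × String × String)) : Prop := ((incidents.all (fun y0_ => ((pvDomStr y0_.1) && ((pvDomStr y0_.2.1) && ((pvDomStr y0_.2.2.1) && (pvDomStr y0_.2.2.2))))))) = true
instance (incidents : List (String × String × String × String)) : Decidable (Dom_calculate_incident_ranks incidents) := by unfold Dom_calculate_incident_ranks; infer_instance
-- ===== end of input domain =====

-- B differs from A only in how the rank is computed (a direct count instead of running
-- accumulators); both return the same dict. Equivalence is over the return value; neither mutates.

-- ===== PORT A =====
def calculate_incident_ranks (incidents : List (String × String × String × String)) : List (String × Int) :=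
  let natures := incidents.map (fun incident => incident.2.2.2)
  let nature_freq := PySem.Dict.counter natures
  let sorted_natures := PySem.List.sorted2 nature_freq.items (fun x => -x.2) (fun x => x.1)
  let final := sorted_natures.foldl
    (fun (st : PySem.Dict String Int × Option Int × Int × Int) nf =>
      let ranks := st.1
      let last_freq := st.2.1
      let last_rank := st.2.2.1
      let skip := st.2.2.2
      if (some nf.2 : Option Int) == last_freq then
        (ranks.insert nf.1 last_rank, some nf.2, last_rank, skip + 1)
      else
        (ranks.insert nf.1 (last_rank + skip), some nf.2, last_rank + skip, 1))
    (PySem.Dict.empty, none, 0, 1)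
  final.1.items

-- ===== PORT B =====
def calculate_incident_ranks_alt (incidents : List (String × String × String × String)) : List (String × Int) :=
  let freq := PySem.Dict.counter (incidents.map (fun incident => incident.2.2.2))
  let ordered := PySem.List.sorted2 freq.items (fun x => -x.2) (fun x => x.1)
  let values := freq.values
  (ordered.foldl
    (fun (d : PySem.Dict String Int) nf =>
      d.insert nf.1 (1 + ((values.countP (fun g => decide (nf.2 < g))) : Int)))
    PySem.Dict.empty).items

-- ===== PRECONDITION & SPEC =====
def Spec_calculate_incident_ranks (incidents : List (String × String × String × String)) (out : List (String × Int)) : Prop := out = calculate_incident_ranks_alt incidents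
instance (incidents : List (String × String × String × String)) (out : List (String × Int)) : Decidable (Spec_calculate_incident_ranks incidents out) := by unfold Spec_calculate_incident_ranks; infer_instance

-- ===== CLAIM (what is proved, stated in full; the proofs are below) =====
def Claim_equal_calculate_incident_ranks : Prop := ∀ (incidents : List (String × String × String × String)), Dom_calculate_incident_ranks incidents → Spec_calculate_incident_ranks incidents (calculate_incident_ranks incidents)

-- ===== LEMMAS AND PROOFS =====

-- insertBy into a list that is nondecreasing under `key` keeps it nondecreasing, provided
-- `before` is compatible with `key` (specific to the tuple comparator of these two ports).
theorem pv_insertBy_pairwise {α : Type} (key : α → Int) (before : α → α → Bool)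
    (h1 : ∀ a b, before a b = true → key a ≤ key b)
    (h2 : ∀ a b, before a b = false → key b ≤ key a)
    (x : α) (ys : List α) (h : ys.Pairwise (fun a b => key a ≤ key b)) :
    (PySem.List.insertBy before x ys).Pairwise (fun a b => key a ≤ key b) := by
  induction ys with
  | nil => simp [PySem.List.insertBy]
  | cons y ys ih =>
    rcases List.pairwise_cons.1 h with ⟨hy, ht⟩
    simp only [PySem.List.insertBy]
    by_cases hb : before x y = true
    · simp only [hb, if_true]
      refine List.pairwise_cons.2 ⟨?_, List.pairwise_cons.2 ⟨hy, ht⟩⟩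
      intro z hz
      rcases List.mem_cons.1 hz with rfl | hz
      · exact h1 _ _ hb
      · exact le_trans (h1 _ _ hb) (hy _ hz)
    · simp only [eq_false_of_ne_true hb]
      refine List.pairwise_cons.2 ⟨?_, ih ht⟩
      intro z hz
      rcases (PySem.List.mem_insertBy before x z ys).1 hz with rfl | hz
      · exact h2 _ _ (eq_false_of_ne_true hb)
      · exact hy _ hz

-- the sorted list of A/B is nonincreasing in frequency
theorem pv_sorted2_freq_pairwise (xs : List (String × Int)) :
    (PySem.List.sorted2 xs (fun x => -x.2) (fun x => x.1)).Pairwise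
      (fun a b => b.2 ≤ a.2) := by
  have key : (String × Int) → Int := fun x => -x.2
  have main : ∀ (l : List (String × Int)) (acc : List (String × Int)),
      acc.Pairwise (fun a b => (fun x : String × Int => -x.2) a ≤ (fun x : String × Int => -x.2) b) →
      (l.foldl (fun acc x => PySem.List.insertBy
          (fun a b => decide ((fun x : String × Int => -x.2) a < (fun x : String × Int => -x.2) b) ||
            (!decide ((fun x : String × Int => -x.2) b < (fun x : String × Int => -x.2) a) &&
              decide ((fun x : String × Int => x.1) a < (fun x : String × Int => x.1) b))) x acc) acc).Pairwise
        (fun a b => (fun x : String × Int => -x.2) a ≤ (fun x : String × Int => -x.2) b) := by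
    intro l
    induction l with
    | nil => intro acc h; exact h
    | cons x l ih =>
      intro acc h
      refine ih _ ?_
      refine pv_insertBy_pairwise _ _ ?_ ?_ x acc h
      · intro a b hb
        simp only [Bool.or_eq_true, Bool.and_eq_true, decide_eq_true_eq, Bool.not_eq_true',
          decide_eq_false_iff_not] at hb
        rcases hb with hb | ⟨hb, _⟩
        · exact le_of_lt hb
        · have hb' : ¬ (-b.2 < -a.2) := hb
          show (-a.2 : Int) ≤ -b.2
          omega
      · intro a b hb
        simp only [Bool.or_eq_false_iff, decide_eq_false_iff_not] at hb
        have hb' : ¬ (-a.2 < -b.2) := hb.1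
        show (-b.2 : Int) ≤ -a.2
        omega
  have h := main xs [] (by simp)
  have h' : (PySem.List.sorted2 xs (fun x => -x.2) (fun x => x.1)).Pairwise
      (fun a b => (fun x : String × Int => -x.2) a ≤ (fun x : String × Int => -x.2) b) := by
    simpa [PySem.List.sorted2] using h
  exact h'.imp (by intro a b hab; have hab' : (-a.2 : Int) ≤ -b.2 := hab; omega)

-- the rank value both programs assign to an entry of the sorted list
def pvRank (L : List (String × Int)) (f : Int) : Int :=
  1 + ((L.countP (fun q => decide (f < q.2))) : Int)

-- A's accumulator loop over a frequency-nonincreasing, name-nodup list builds exactly the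
-- closed-form ranks (invariant: last_rank is the rank of last_freq, last_rank + skip = |prefix| + 1).
theorem pv_loopA (L : List (String × Int))
    (hnd : (L.map (·.1)).Nodup)
    (hs : L.Pairwise (fun a b => b.2 ≤ a.2)) :
    ∀ (r p : List (String × Int)) (d : PySem.Dict String Int) (lf : Option Int) (lr sk : Int),
      L = p ++ r →
      d.items = p.map (fun e => (e.1, pvRank L e.2)) →
      ((p = [] ∧ lf = none ∧ lr = 0 ∧ sk = 1) ∨
        (∃ f0, lf = some f0 ∧ f0 ∈ p.map (·.2) ∧ lr = pvRank L f0 ∧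
          lr + sk = p.length + 1 ∧ ∀ q ∈ p, f0 ≤ q.2)) →
      (r.foldl
        (fun (st : PySem.Dict String Int × Option Int × Int × Int) nf =>
          if (some nf.2 : Option Int) == st.2.1 then
            (st.1.insert nf.1 st.2.2.1, some nf.2, st.2.2.1, st.2.2.2 + 1)
          else
            (st.1.insert nf.1 (st.2.2.1 + st.2.2.2), some nf.2, st.2.2.1 + st.2.2.2, 1))
        (d, lf, lr, sk)).1.items = L.map (fun e => (e.1, pvRank L e.2)) := by
  intro r
  induction r with
  | nil =>
    intro p d lf lr sk hL hd _
    have hp : p = L := by rw [hL, List.append_nil]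
    exact hp ▸ hd
  | cons e r ih =>
    intro p d lf lr sk hL hd hinv
    -- e's name is fresh in d
    have hkeys : d.keys = p.map (·.1) := by
      show d.items.map (·.1) = _
      rw [hd]; simp
    have hmemkeys : e.1 ∉ d.keys := by
      rw [hkeys]
      have : (L.map (·.1)).Nodup := hnd
      rw [hL] at this
      simp only [List.map_append, List.nodup_append] at this
      intro hmem
      have h2 : e.1 ∈ (e :: r).map (·.1) := by simp
      exact this.2.2 e.1 hmem e.1 h2 rfl
    have hcont : d.contains e.1 = false := by
      rw [PySem.Dict.contains_eq_decide_mem_keys]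
      exact decide_eq_false hmemkeys
    -- everything before e has freq ≥ e.2, everything after has freq ≤ e.2
    have hsplit := hL ▸ hs
    rw [List.pairwise_append] at hsplit
    have hpge : ∀ q ∈ p, e.2 ≤ q.2 := fun q hq => hsplit.2.2 q hq e (by simp)
    have hrle : ∀ q ∈ r, q.2 ≤ e.2 := by
      have := List.pairwise_cons.1 hsplit.2.1
      exact this.1
    simp only [List.foldl_cons]
    by_cases hbe : ((some e.2 : Option Int) == lf) = true
    · -- same frequency as the previous entry: p nonempty, rank is last_rank
      have hlf : lf = some e.2 := (eq_of_beq hbe).symm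
      rcases hinv with ⟨-, hlfnone, -, -⟩ | ⟨f0, hlf0, hf0mem, hlr, hlrsk, hge⟩
      · simp [hlfnone] at hlf
      have hf0 : f0 = e.2 := by rw [hlf0] at hlf; exact Option.some.inj hlf
      subst hf0
      rw [if_pos hbe]
      refine ih (p ++ [e]) _ (some e.2) lr (sk + 1) (by rw [hL]; simp) ?_ ?_
      · rw [PySem.Dict.items_insert_of_not_contains _ _ hcont, hd, hlr]
        simp
      · refine Or.inr ⟨e.2, rfl, by simp, hlr, ?_, ?_⟩
        · simp only [List.length_append, List.length_cons, List.length_nil]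
          push_cast
          omega
        · intro q hq
          rcases List.mem_append.1 hq with hq | hq
          · exact hge q hq
          · simp at hq; rw [hq]
      
    · -- new (strictly smaller) frequency: rank is last_rank + skip = |p| + 1
      have hne : lf ≠ some e.2 := by
        intro h; exact hbe (by rw [h]; simp)
      have hrank : lr + sk = pvRank L e.2 := by
        -- pvRank L e.2 = p.length + 1, since exactly the p-entries have freq > e.2
        have hcnt : L.countP (fun q => decide (e.2 < q.2)) = p.length := by
          rw [hL, List.countP_append]
          have h2 : (e :: r).countP (fun q => decide (e.2 < q.2)) = 0 := by
            rw [List.countP_eq_zero]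
            intro q hq
            rcases List.mem_cons.1 hq with rfl | hq
            · simp
            · have := hrle q hq; simp; omega
          have h1 : p.countP (fun q => decide (e.2 < q.2)) = p.length := by
            rw [List.countP_eq_length]
            intro q hq
            have hle := hpge q hq
            have hlt : e.2 < q.2 := by
              rcases hinv with ⟨hpnil, -, -, -⟩ | ⟨f0, hlf0, hf0mem, -, -, hge⟩
              · rw [hpnil] at hq; simp at hq
              · have hf0ne : f0 ≠ e.2 := fun h => hne (by rw [hlf0, h])
                rcases List.mem_map.1 hf0mem with ⟨q0, hq0, hq0f⟩
                have := hpge q0 hq0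
                have := hge q hq
                omega
            simpa using hlt
          omega
        have hlen : lr + sk = p.length + 1 := by
          rcases hinv with ⟨hpnil, -, hlr, hsk⟩ | ⟨f0, -, -, -, hlrsk, -⟩
          · rw [hpnil]; simp [hlr, hsk]
          · exact hlrsk
        rw [pvRank, hcnt, hlen]; ring
      rw [if_neg hbe]
      refine ih (p ++ [e]) _ (some e.2) (lr + sk) 1 (by rw [hL]; simp) ?_ ?_
      · rw [PySem.Dict.items_insert_of_not_contains _ _ hcont, hd, hrank]
        simp
      · refine Or.inr ⟨e.2, rfl, by simp, hrank, ?_, ?_⟩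
        · simp only [List.length_append, List.length_cons, List.length_nil]
          have : lr + sk = p.length + 1 := by
            rcases hinv with ⟨hpnil, -, hlr, hsk⟩ | ⟨f0, -, -, -, hlrsk, -⟩
            · rw [hpnil]; simp [hlr, hsk]
            · exact hlrsk
          push_cast
          omega
        · intro q hq
          rcases List.mem_append.1 hq with hq | hq
          · exact hpge q hq
          · simp at hq; rw [hq]

-- ===== VERDICT (by name: the statement is the Claim_ definition above) =====
theorem calculate_incident_ranks_spec : Claim_equal_calculate_incident_ranks := by
  intro incidents _
  show calculate_incident_ranks incidents = calculate_incident_ranks_alt incidents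
  unfold calculate_incident_ranks calculate_incident_ranks_alt
  set natures := incidents.map (fun incident => incident.2.2.2) with hnat
  set items := (PySem.Dict.counter natures).items with hitems
  set L := PySem.List.sorted2 items (fun x => -x.2) (fun x => x.1) with hLdef
  have hperm : L.Perm items := PySem.List.sorted2_perm _ _ _ _
  have hitems' : items = (PySem.Set.ofList natures).map (fun k => (k, (natures.count k : Int))) :=
    PySem.Dict.items_counter natures
  -- names in L are distinct
  have hnd : (L.map (·.1)).Nodup := by
    have hpm : (L.map (·.1)).Perm (items.map (·.1)) := hperm.map _
    refine hpm.nodup_iff.2 ?_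
    rw [hitems']
    simp only [List.map_map]
    have : ((fun p : String × Int => p.1) ∘ fun k => (k, (natures.count k : Int))) = id := rfl
    rw [this, List.map_id]
    exact PySem.Set.nodup_ofList natures
  have hs := pv_sorted2_freq_pairwise items
  -- the per-entry counts over `values` equal the counts over L
  have hvals : ∀ f : Int, (PySem.Dict.values (PySem.Dict.counter natures)).countP (fun g => decide (f < g))
      = L.countP (fun q => decide (f < q.2)) := by
    intro f
    have hvperm : (L.map (·.2)).Perm (items.map (·.2)) := hperm.map _
    have : (items.map (·.2)) = PySem.Dict.values (PySem.Dict.counter natures) := by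
      rw [hitems]; rfl
    rw [← this, ← hvperm.countP_eq, List.countP_map]
    rfl
  -- A's side: the loop lemma with empty initial state
  have hA := pv_loopA L hnd hs L [] PySem.Dict.empty none 0 1 rfl rfl (Or.inl ⟨rfl, rfl, rfl, rfl⟩)
  -- B's side: a fresh-key insert loop appends
  have hB := PySem.Dict.items_foldl_insert_fresh L (fun nf => nf.1)
      (fun nf => 1 + ((PySem.Dict.values (PySem.Dict.counter natures)).countP (fun g => decide (nf.2 < g)) : Int))
      PySem.Dict.empty (fun a _ => PySem.Dict.contains_empty _) hnd
  rw [hA, hB]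
  rw [show PySem.Dict.empty.items = ([] : List (String × Int)) from rfl, List.nil_append]
  refine List.map_congr_left ?_
  intro e _
  dsimp only
  rw [pvRank, hvals e.2]
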